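-- pv_equiv track=rewrite | github.com/paalped/SumLengthOfXinN | calculations.py | slowSumStringLengthOfXinN
-- ===== SOURCE A (Python) =====
-- def slowSumStringLengthOfXinN(n):
--     __doc__ = ''' Function for calculating the string length of the concatenation
--     of every number in n ,
--     becomes time and memory consuming when n gets big'''
--     s=''
--     for i in range(n):
--         s += str(i)
--     return len(s)
-- ===== SOURCE B (Python) =====
-- def slowSumStringLengthOfXinN(n):
--     ''' Sum of len(str(i)) for i in range(n), computed per decimal-magnitude
--     band in closed form: O(log n) instead of building the concatenation. '''
--     if n <= 0:
--         return 0
--     D = len(str(n - 1))          # digit count of the largest number printed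
--     total = 0
--     for d in range(1, D + 1):
--         lo = 0 if d == 1 else 10 ** (d - 1)
--         hi = min(n, 10 ** d)
--         total += d * (hi - lo)
--     return total
-- ===== Notes on version B (the rewrite author's own statement) =====
-- stated objective: faster
-- what changed: Instead of concatenating str(i) for every i in range(n) and measuring the result, B sums d * (count of d-digit numbers below n) over the O(log n) decimal-magnitude bands in closed form.
import Mathlib
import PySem

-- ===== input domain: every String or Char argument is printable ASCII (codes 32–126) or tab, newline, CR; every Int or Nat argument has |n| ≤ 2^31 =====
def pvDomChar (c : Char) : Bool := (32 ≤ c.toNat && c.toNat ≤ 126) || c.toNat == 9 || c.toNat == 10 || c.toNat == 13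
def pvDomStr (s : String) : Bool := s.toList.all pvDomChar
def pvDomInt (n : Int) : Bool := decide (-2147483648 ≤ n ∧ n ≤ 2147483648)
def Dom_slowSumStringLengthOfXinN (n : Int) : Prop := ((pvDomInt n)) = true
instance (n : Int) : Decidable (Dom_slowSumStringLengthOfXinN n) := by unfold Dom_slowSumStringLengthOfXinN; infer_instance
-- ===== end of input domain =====

-- B replaces A's building of the whole concatenated string by a closed-form sum over
-- the decimal-magnitude bands (faster); A = B on every input (both are total).

-- ===== PORT A =====
-- Python strings ported as List Char (PySem convention: Lean's own String ops are
-- opaque to the kernel); `s += str(i)` is `s ++ PySem.Int.toChars i`, `len` is `.length`.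
def slowSumStringLengthOfXinN (n : Int) : Int :=
  let s : List Char :=
    (PySem.List.pyRange 0 n 1).foldl (fun s i => s ++ PySem.Int.toChars i) []
  (s.length : Int)

-- ===== PORT B =====
def slowSumStringLengthOfXinN_alt (n : Int) : Int :=
  if n ≤ 0 then 0
  else
    let D : Int := ((PySem.Int.toChars (n - 1)).length : Int)   -- len(str(n-1))
    (PySem.List.pyRange 1 (D + 1) 1).foldl
      (fun total d =>
        let lo : Int := if d = 1 then 0 else 10 ^ (d - 1).toNat
        let hi : Int := min n (10 ^ d.toNat)
        total + d * (hi - lo)) 0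

-- ===== PRECONDITION & SPEC =====
def Spec_slowSumStringLengthOfXinN (n : Int) (out : Int) : Prop := out = slowSumStringLengthOfXinN_alt n
instance (n : Int) (out : Int) : Decidable (Spec_slowSumStringLengthOfXinN n out) := by unfold Spec_slowSumStringLengthOfXinN; infer_instance

-- ===== CLAIM (what is proved, stated in full; the proofs are below) =====
def Claim_equal_slowSumStringLengthOfXinN : Prop := ∀ (n : Int), Dom_slowSumStringLengthOfXinN n → Spec_slowSumStringLengthOfXinN n (slowSumStringLengthOfXinN n)

-- ===== LEMMAS AND PROOFS =====

-- Exact digit count: str(m) for a natural m has log₁₀ m + 1 characters.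
theorem toDigitsCore_len_exact (f : Nat) : ∀ (m : Nat) (l : List Char), m < f →
    (Nat.toDigitsCore 10 f m l).length = Nat.log 10 m + 1 + l.length := by
  induction f with
  | zero => intro m l h; omega
  | succ f ih =>
    intro m l h
    simp only [Nat.toDigitsCore]
    by_cases h10 : m / 10 = 0
    · have : m < 10 := by omega
      simp [h10, Nat.log_eq_zero_iff.mpr (Or.inl this)]
      omega
    · have hm : 10 ≤ m := by
        by_contra hc
        exact h10 (Nat.div_eq_of_lt (by omega))
      have hlt : m / 10 < f := by
        have := Nat.div_lt_self (by omega : 0 < m) (by omega : 1 < 10)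
        omega
      have hlog : Nat.log 10 m = Nat.log 10 (m / 10) + 1 := by
        rw [Nat.log_div_base]
        have : 0 < Nat.log 10 m := Nat.log_pos (by omega) hm
        omega
      rw [if_neg h10, ih (m / 10) _ hlt]
      simp only [List.length_cons, hlog]
      omega

theorem toDigits_len_exact (m : Nat) :
    (Nat.toDigits 10 m).length = Nat.log 10 m + 1 := by
  simpa using toDigitsCore_len_exact (m + 1) m [] (by omega)

theorem toChars_len_nat (m : Nat) :
    (PySem.Int.toChars (m : Int)).length = Nat.log 10 m + 1 := by
  simp only [PySem.Int.toChars]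
  rw [if_neg (by omega : ¬ ((m : Int) < 0))]
  simpa using toDigits_len_exact m

-- The reference sum: Sn m = Σ_{k<m} len(str(k)).
def Sn : Nat → Int
  | 0 => 0
  | m + 1 => Sn m + (Nat.log 10 m + 1)

-- The band sum: Tn n D = Σ_{d=1}^{D} d · (min n 10^d − lo_d), lo_1 = 0, lo_d = 10^(d−1).
def Tn (n : Int) : Nat → Int
  | 0 => 0
  | j + 1 => Tn n j + ((j : Int) + 1) * (min n (10 ^ (j + 1)) - (if j = 0 then 0 else 10 ^ j))

-- A's fold equals Sn.
theorem portA_eq_Sn (m : Nat) : slowSumStringLengthOfXinN (m : Int) = Sn m := by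
  induction m with
  | zero => simp [slowSumStringLengthOfXinN, Sn, PySem.List.pyRange_one_eq_nil]
  | succ m ih =>
    have hsplit : PySem.List.pyRange 0 ((m : Int) + 1) 1 =
        PySem.List.pyRange 0 (m : Int) 1 ++ [(m : Int)] :=
      PySem.List.pyRange_one_succ_right (by positivity)
    simp only [slowSumStringLengthOfXinN] at ih ⊢
    push_cast
    rw [hsplit, List.foldl_append]
    simp only [List.foldl_cons, List.foldl_nil, List.length_append, Sn]
    push_cast
    rw [← ih, toChars_len_nat]
    push_cast
    ring

-- B's fold equals Tn.
theorem foldB_eq_Tn (n : Int) (D : Nat) :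
    (PySem.List.pyRange 1 ((D : Int) + 1) 1).foldl
      (fun total d =>
        let lo : Int := if d = 1 then 0 else 10 ^ (d - 1).toNat
        let hi : Int := min n (10 ^ d.toNat)
        total + d * (hi - lo)) 0 = Tn n D := by
  induction D with
  | zero => simp [Tn, PySem.List.pyRange_one_eq_nil]
  | succ j ih =>
    have hsplit : PySem.List.pyRange 1 ((j : Int) + 1 + 1) 1 =
        PySem.List.pyRange 1 ((j : Int) + 1) 1 ++ [(j : Int) + 1] :=
      PySem.List.pyRange_one_succ_right (by omega)
    push_cast
    rw [hsplit, List.foldl_append, ih]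
    simp only [List.foldl_cons, List.foldl_nil, Tn]
    have h1 : ((j : Int) + 1 - 1).toNat = j := by omega
    have h2 : ((j : Int) + 1).toNat = j + 1 := by omega
    have h3 : ((j : Int) + 1 = 1) ↔ (j = 0) := by omega
    simp only [h1, h2, h3]

-- Tn is unchanged by n → n+1 while every counted band is already full.
theorem Tn_stable (m : Nat) : ∀ d : Nat, 10 ^ d ≤ m →
    Tn ((m : Int) + 1) d = Tn (m : Int) d := by
  intro d
  induction d with
  | zero => intro _; rfl
  | succ j ih =>
    intro h
    have hj : 10 ^ j ≤ m := le_trans (Nat.pow_le_pow_right (by omega) (by omega)) h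
    have hle : (10 : Int) ^ (j + 1) ≤ (m : Int) := by exact_mod_cast h
    rw [Tn, Tn, ih hj, min_eq_right hle, min_eq_right (le_trans hle (by omega))]

-- The heart: the band sum with D = len(str(m−1)) digits equals the running sum.
theorem Tn_eq_Sn : ∀ m : Nat, 1 ≤ m →
    Tn (m : Int) (Nat.log 10 (m - 1) + 1) = Sn m := by
  intro m
  induction m with
  | zero => intro h; omega
  | succ m ih =>
    intro _
    by_cases hm : m = 0
    · subst hm; simp [Tn, Sn]
    · have hm1 : 1 ≤ m := by omega
      set L := Nat.log 10 m with hL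
      have hpowle : 10 ^ L ≤ m := Nat.pow_log_le_self 10 (by omega)
      have hltpow : m < 10 ^ (L + 1) := Nat.lt_pow_succ_log_self (by omega) m
      have hminm1 : min ((m : Int) + 1) (10 ^ (L + 1)) = (m : Int) + 1 :=
        min_eq_left (by exact_mod_cast hltpow)
      have hstable : Tn ((m : Int) + 1) L = Tn (m : Int) L := Tn_stable m L hpowle
      have hgoal : (m + 1 : Nat) - 1 = m := by omega
      rw [hgoal]
      simp only [Sn]
      push_cast
      rw [Tn, hminm1, hstable]
      by_cases hcase : Nat.log 10 (m - 1) = L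
      · -- same digit count: only the top band grows by one
        have hold := ih hm1
        rw [hcase, Tn] at hold
        rw [min_eq_left (by exact_mod_cast le_of_lt hltpow : (m : Int) ≤ 10 ^ (L + 1))] at hold
        rw [← hL, ← hold]
        ring
      · -- digit count increased: m = 10^L, a new one-element band opens
        have hmono : Nat.log 10 (m - 1) ≤ L := Nat.log_mono_right (by omega)
        have hL0 : 1 ≤ L := by
          by_contra hc
          exact hcase (by omega)
        have hlogm1 : Nat.log 10 (m - 1) = L - 1 := by
          have hlow : L - 1 ≤ Nat.log 10 (m - 1) := by
            have hp : 10 ^ (L - 1) ≤ m - 1 := by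
              have h2 : 10 ^ (L - 1) < 10 ^ L := Nat.pow_lt_pow_right (by omega) (by omega)
              omega
            exact Nat.le_log_of_pow_le (by omega) hp
          omega
        have hmeq : (m : Int) = 10 ^ L := by
          have hup : m - 1 < 10 ^ ((L - 1) + 1) := by
            have := Nat.lt_pow_succ_log_self (by omega : 1 < 10) (m - 1)
            rwa [hlogm1] at this
          have hLL : (L - 1) + 1 = L := by omega
          rw [hLL] at hup
          have : m = 10 ^ L := by omega
          exact_mod_cast this
        have hold := ih hm1
        rw [hlogm1] at hold
        have hLL : (L - 1) + 1 = L := by omega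
        rw [hLL] at hold
        rw [← hL, hold, hmeq]
        have hLne : ¬ (L = 0) := by omega
        simp only [if_neg hLne]
        ring

-- ===== VERDICT (by name: the statement is the Claim_ definition above) =====
theorem slowSumStringLengthOfXinN_spec : Claim_equal_slowSumStringLengthOfXinN := by
  intro n _
  unfold Spec_slowSumStringLengthOfXinN slowSumStringLengthOfXinN_alt
  by_cases hn : n ≤ 0
  · simp only [if_pos hn, slowSumStringLengthOfXinN,
      PySem.List.pyRange_one_eq_nil hn, List.foldl_nil, List.length_nil]
    rfl
  · have hpos : 0 < n := by omega
    obtain ⟨m, rfl⟩ : ∃ m : Nat, n = (m : Int) := ⟨n.toNat, by omega⟩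
    have hm1 : 1 ≤ m := by exact_mod_cast hpos
    simp only [if_neg hn]
    have hsub : (m : Int) - 1 = ((m - 1 : Nat) : Int) := by omega
    rw [hsub, toChars_len_nat (m - 1)]
    rw [portA_eq_Sn]
    have := foldB_eq_Tn (m : Int) (Nat.log 10 (m - 1) + 1)
    push_cast at this ⊢
    rw [this]
    exact_mod_cast (Tn_eq_Sn m hm1).symm
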